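-- pv_equiv track=rewrite | github.com/ahmed-elbary/Multi_Robot_path_planning | src/planner/fragment_planner.py | _earliest_block_on_path
-- ===== SOURCE A (Python) =====
-- from typing import List, Dict, Tuple, Optional
--
-- def _earliest_block_on_path(path: List[str], blocks: List[Tuple[str, str]]) -> Optional[Tuple[int, str, str]]:
--     """
--     Given a node path and a set of (node, owner) blocks, return the earliest
--     blocked node index in the path (>=1) and the (node, owner).
--     """
--     if not blocks:
--         return None
--     node_to_owner = {n: o for (n, o) in blocks}
--     for idx, n in enumerate(path[1:], start=1):
--         if n in node_to_owner:
--             return (idx, n, node_to_owner[n])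
--     return None
-- ===== SOURCE B (Python) =====
-- def _earliest_block_on_path(path, blocks):
--     # Invert the traversal: index first occurrences of path[1:] once,
--     # then scan blocks tracking the minimal index (<= keeps last owner for duplicate block nodes).
--     first_idx = {}
--     for i, n in enumerate(path[1:], start=1):
--         if n not in first_idx:
--             first_idx[n] = i
--     best = None
--     for n, o in blocks:
--         i = first_idx.get(n)
--         if i is not None and (best is None or i <= best[0]):
--             best = (i, n, o)
--     return best
-- ===== Notes on version B (the rewrite author's own statement) =====
-- stated objective: alternative
-- what changed: Inverts the traversal: instead of building a node->owner dict and scanning path[1:] with early return, B builds a first-occurrence index of path[1:] once and scans the blocks list keeping a running minimum index (<= update so a later duplicate block overwrites the owner).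
import Mathlib
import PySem

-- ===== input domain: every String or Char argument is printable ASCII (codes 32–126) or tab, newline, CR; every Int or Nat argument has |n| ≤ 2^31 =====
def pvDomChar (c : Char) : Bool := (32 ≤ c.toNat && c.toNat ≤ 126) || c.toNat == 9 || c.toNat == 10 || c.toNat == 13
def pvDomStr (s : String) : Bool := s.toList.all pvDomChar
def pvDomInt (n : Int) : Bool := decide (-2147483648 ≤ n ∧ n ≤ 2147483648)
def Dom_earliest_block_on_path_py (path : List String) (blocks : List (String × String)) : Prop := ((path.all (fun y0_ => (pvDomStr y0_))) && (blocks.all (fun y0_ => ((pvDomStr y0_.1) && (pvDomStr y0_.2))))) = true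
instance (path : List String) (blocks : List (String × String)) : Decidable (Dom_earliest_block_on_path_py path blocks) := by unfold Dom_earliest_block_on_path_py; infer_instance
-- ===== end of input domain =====

-- B indexes the path once and min-scans the blocks, instead of A's dict-of-blocks plus
-- early-return scan of the path; same cost, different traversal (objective: alternative).

-- ===== PORT A =====
-- the 'for idx, n in enumerate(path[1:], start=1): if n in node_to_owner: return …' loop
def pvALoop (d : PySem.Dict String String) : List (Int × String) → Option (Int × String × String)
  | [] => none
  | (idx, n) :: rest =>
    match d.get? n with
    | some o => some (idx, n, o)
    | none => pvALoop d rest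

def earliest_block_on_path_py (path : List String) (blocks : List (String × String)) : Option (Int × String × String) :=
  if blocks = [] then none
  else
    let node_to_owner := blocks.foldl (fun d p => d.insert p.1 p.2) PySem.Dict.empty
    pvALoop node_to_owner (PySem.List.enumerate (PySem.List.slice path (some 1) none) 1)

-- ===== PORT B =====
-- the 'for i, n in enumerate(path[1:], start=1): if n not in first_idx: first_idx[n] = i' loop
def pvBBuild : List (Int × String) → PySem.Dict String Int → PySem.Dict String Int
  | [], f => f
  | (i, n) :: rest, f => pvBBuild rest (if f.contains n then f else f.insert n i)

-- one step of B's 'for n, o in blocks' loop with the running best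
def pvBStep (f : PySem.Dict String Int) (best : Option (Int × String × String)) (p : String × String) : Option (Int × String × String) :=
  match f.get? p.1 with
  | none => best
  | some i =>
    match best with
    | none => some (i, p.1, p.2)
    | some b => if i ≤ b.1 then some (i, p.1, p.2) else best

def earliest_block_on_path_py_alt (path : List String) (blocks : List (String × String)) : Option (Int × String × String) :=
  let first_idx := pvBBuild (PySem.List.enumerate (PySem.List.slice path (some 1) none) 1) PySem.Dict.empty
  blocks.foldl (pvBStep first_idx) none

-- ===== PRECONDITION & SPEC =====
def Spec_earliest_block_on_path_py (path : List String) (blocks : List (String × String)) (out : Option (Int × String × String)) : Prop := out = earliest_block_on_path_py_alt path blocks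
instance (path : List String) (blocks : List (String × String)) (out : Option (Int × String × String)) : Decidable (Spec_earliest_block_on_path_py path blocks out) := by unfold Spec_earliest_block_on_path_py; infer_instance

-- ===== CLAIM (what is proved, stated in full; the proofs are below) =====
def Claim_equal_earliest_block_on_path_py : Prop := ∀ (path : List String) (blocks : List (String × String)), Dom_earliest_block_on_path_py path blocks → Spec_earliest_block_on_path_py path blocks (earliest_block_on_path_py path blocks)

-- ===== LEMMAS AND PROOFS =====

-- first index (≥ s) of n in l, the value B's first_idx dict stores for n
def pvFidx : List String → Int → String → Option Int
  | [], _, _ => none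
  | m :: rest, s, n => if m = n then some s else pvFidx rest (s + 1) n

theorem pvALoop_empty (l : List String) (s : Int) :
    pvALoop PySem.Dict.empty (PySem.List.enumerate l s) = none := by
  induction l generalizing s with
  | nil => simp [PySem.List.enumerate, pvALoop]
  | cons m rest ih =>
    simp [PySem.List.enumerate_cons, pvALoop, PySem.Dict.get?_empty, ih]

theorem pvFidx_ge (l : List String) (s i : Int) (n : String)
    (h : pvFidx l s n = some i) : s ≤ i := by
  induction l generalizing s with
  | nil => simp [pvFidx] at h
  | cons m rest ih =>
    simp only [pvFidx] at h
    split at h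
    · have : s = i := Option.some.inj h
      omega
    · have := ih (s + 1) h; omega

theorem pvALoop_ge (d : PySem.Dict String String) (l : List String) (s : Int)
    (b : Int × String × String)
    (h : pvALoop d (PySem.List.enumerate l s) = some b) : s ≤ b.1 := by
  induction l generalizing s with
  | nil => simp [PySem.List.enumerate, pvALoop] at h
  | cons m rest ih =>
    rw [PySem.List.enumerate_cons] at h
    simp only [pvALoop] at h
    cases hg : d.get? m with
    | some o =>
      rw [hg] at h
      have := Option.some.inj h
      subst this
      simp
    | none => rw [hg] at h; have := ih (s + 1) h; omega

theorem pvBBuild_get (l : List String) (s : Int) (d0 : PySem.Dict String Int) (n : String) :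
    (pvBBuild (PySem.List.enumerate l s) d0).get? n =
      match d0.get? n with
      | some i => some i
      | none => pvFidx l s n := by
  induction l generalizing s d0 with
  | nil =>
    simp only [PySem.List.enumerate, pvBBuild, pvFidx]
    cases d0.get? n <;> rfl
  | cons m rest ih =>
    rw [PySem.List.enumerate_cons]
    simp only [pvBBuild]
    by_cases hc : d0.contains m = true
    · rw [if_pos hc, ih, pvFidx]
      have hs : ∃ v, d0.get? m = some v := by
        have := PySem.Dict.contains_eq_isSome_get? (d := d0) (k := m)
        rw [hc] at this
        cases hg : d0.get? m with
        | some v => exact ⟨v, rfl⟩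
        | none => rw [hg] at this; simp at this
      by_cases hmn : m = n
      · subst hmn
        obtain ⟨v, hv⟩ := hs
        simp [hv]
      · simp [hmn]
    · rw [if_neg hc, ih]
      have hg0 : d0.get? m = none := by
        have := PySem.Dict.contains_eq_isSome_get? (d := d0) (k := m)
        simp only [Bool.not_eq_true] at hc
        rw [hc] at this
        cases hg : d0.get? m with
        | some v => rw [hg] at this; simp at this
        | none => rfl
      by_cases hmn : m = n
      · subst hmn
        rw [PySem.Dict.get?_insert_self, hg0, pvFidx]
        simp
      · rw [PySem.Dict.get?_insert_of_ne _ _ (fun h => hmn h.symm), pvFidx, if_neg hmn]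

-- the heart: inserting one more block (n, o) into A's dict changes A's scan exactly
-- the way B's min-update step changes the running best
theorem pvInsert_step (d : PySem.Dict String String) (l : List String) (s : Int)
    (n o : String) :
    pvALoop (d.insert n o) (PySem.List.enumerate l s) =
      match pvFidx l s n with
      | none => pvALoop d (PySem.List.enumerate l s)
      | some i =>
        match pvALoop d (PySem.List.enumerate l s) with
        | none => some (i, n, o)
        | some b => if i ≤ b.1 then some (i, n, o) else some b := by
  induction l generalizing s with
  | nil => simp [PySem.List.enumerate, pvALoop, pvFidx]
  | cons m rest ih =>
    rw [PySem.List.enumerate_cons]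
    by_cases hmn : m = n
    · subst hmn
      simp only [pvALoop, pvFidx, PySem.Dict.get?_insert_self]
      cases hg : d.get? m with
      | some w => simp
      | none =>
        cases hr : pvALoop d (PySem.List.enumerate rest (s + 1)) with
        | none => simp
        | some b =>
          have hb := pvALoop_ge d rest (s + 1) b hr
          simp [if_pos (by omega : s ≤ b.1)]
    · have hins : (d.insert n o).get? m = d.get? m :=
        PySem.Dict.get?_insert_of_ne (d := d) (v := o) hmn
      simp only [pvALoop, pvFidx, if_neg hmn, hins]
      cases hg : d.get? m with
      | some w =>
        cases hf : pvFidx rest (s + 1) n with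
        | none => simp
        | some i =>
          have hi := pvFidx_ge rest (s + 1) i n hf
          simp [if_neg (by omega : ¬ i ≤ s)]
      | none =>
        exact ih (s + 1)

theorem pvMain (l : List String) (s : Int) (blocks : List (String × String))
    (f : PySem.Dict String Int) (hf : ∀ n, f.get? n = pvFidx l s n) :
    pvALoop (blocks.foldl (fun d p => d.insert p.1 p.2) PySem.Dict.empty)
        (PySem.List.enumerate l s) =
      blocks.foldl (pvBStep f) none := by
  induction blocks using List.reverseRecOn with
  | nil => simpa using pvALoop_empty l s
  | append_singleton bs p ih =>
    rw [List.foldl_append, List.foldl_append]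
    simp only [List.foldl_cons, List.foldl_nil]
    rw [pvInsert_step, ih]
    generalize List.foldl (pvBStep f) none bs = best
    simp only [pvBStep]
    rw [hf p.1]
    cases pvFidx l s p.1 with
    | none => cases best <;> rfl
    | some i => cases best <;> rfl

-- ===== VERDICT (by name: the statement is the Claim_ definition above) =====
theorem earliest_block_on_path_py_spec : Claim_equal_earliest_block_on_path_py := by
  intro path blocks _
  unfold Spec_earliest_block_on_path_py earliest_block_on_path_py earliest_block_on_path_py_alt
  by_cases hb : blocks = []
  · subst hb; simp
  · rw [if_neg hb]
    exact pvMain _ 1 blocks _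
      (fun n => pvBBuild_get _ 1 PySem.Dict.empty n ▸ by rw [PySem.Dict.get?_empty])
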